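-- pv_equiv track=rewrite | github.com/TranslatorIIPrototypes/robo-commons | qualitiy_tests/compare_diff_with_cache.py | get_function_name
-- ===== SOURCE A (Python) =====
-- def unwrap(ftext):
--     """We know that there will only be nested parens in the first argument"""
--     l = ftext.index('(')
--     fname = ftext[:l]
--     argstring = ftext[l + 1:-1]
--     if ')' in argstring:
--         r = argstring.rindex(')')
--         arg0 = argstring[:r + 1]
--         args = [arg0] + argstring[r + 2:].split(',')
--     else:
--         args = argstring.split(',')
--     return fname, args
--
-- def get_function_name(functiontext):
--     if '(' in functiontext:
--         fname, args = unwrap(functiontext)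
--         if fname == 'output_filter':
--             newargs = get_function_name(args[0])
--             return newargs
--         elif fname == 'upcast':
--             newargs = get_function_name(args[0])
--             return newargs
--         elif fname == 'input_filter':
--             newargs = get_function_name(args[0])
--             if len(args) == 3:
--                 newargs = get_function_name(args[0])
--             return newargs
--     else:
--         fname = '.'.join(functiontext.split(',')[0].split('~'))
--         return fname
-- ===== SOURCE B (Python) =====
-- WRAPPERS = ('output_filter', 'upcast', 'input_filter')
--
-- def get_function_name(functiontext):
--     t = functiontext
--     while '(' in t:
--         l = t.index('(')
--         if t[:l] not in WRAPPERS: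
--             return None
--         body = t[l + 1:-1]
--         if ')' in body:
--             t = body[:body.rindex(')') + 1]
--         else:
--             t = body.split(',')[0]
--     return '.'.join(t.split(',')[0].split('~'))
-- ===== Notes on version B (the rewrite author's own statement) =====
-- stated objective: simpler
-- what changed: Replaces A's three duplicated recursive branches (including the redundant len(args)==3 re-computation) and full argument-list construction with a single iterative while-loop that keeps only the first argument and tests wrapper names by one tuple membership.
import Mathlib
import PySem

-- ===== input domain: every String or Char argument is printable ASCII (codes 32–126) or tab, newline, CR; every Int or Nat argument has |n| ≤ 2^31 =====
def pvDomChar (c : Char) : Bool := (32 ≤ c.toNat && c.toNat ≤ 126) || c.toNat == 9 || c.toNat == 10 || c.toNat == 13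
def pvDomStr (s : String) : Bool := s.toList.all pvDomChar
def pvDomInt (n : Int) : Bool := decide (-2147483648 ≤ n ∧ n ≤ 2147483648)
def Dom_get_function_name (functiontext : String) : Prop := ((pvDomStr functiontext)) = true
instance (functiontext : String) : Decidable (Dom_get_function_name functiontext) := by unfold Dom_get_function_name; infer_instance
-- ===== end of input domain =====

-- B replaces A's triple-branch recursion by a single iterative unwrap loop with one wrapper-membership test; objective: simpler.

-- ===== PORT A =====

-- termination helper: every piece produced by splitOn is no longer than the source string
theorem pv_splitOn_go_mem_len (sep : List Char) (fuel : Nat) :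
    ∀ (l cur : List Char) (acc : List (List Char)) (x : List Char),
      x ∈ PySem.Chars.splitOn.go sep fuel l cur acc → x ∈ acc ∨ x.length ≤ cur.length + l.length := by
  induction fuel with
  | zero =>
    intro l cur acc x hx
    simp [PySem.Chars.splitOn.go] at hx
    rcases hx with hx | hx
    · exact Or.inl hx
    · right; subst hx; simp
  | succ fuel ih =>
    intro l cur acc x hx
    match l with
    | [] =>
      simp [PySem.Chars.splitOn.go] at hx
      rcases hx with hx | hx
      · exact Or.inl hx
      · right; subst hx; simp
    | c :: rest =>
      rw [PySem.Chars.splitOn.go] at hx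
      by_cases hp : sep.isPrefixOf (c :: rest) = true
      · simp only [hp, if_true] at hx
        rcases ih _ _ _ _ hx with hx | hx
        · rcases List.mem_cons.1 hx with hx | hx
          · right; subst hx; simp only [List.length_reverse]; omega
          · exact Or.inl hx
        · right
          simp [List.length_drop] at hx ⊢; omega
      · simp only [hp] at hx
        rcases ih _ _ _ _ hx with hx | hx
        · exact Or.inl hx
        · right; simp at hx ⊢; omega

theorem pv_splitOn_headD_len (s sep : List Char) :
    ((PySem.Chars.splitOn s sep).headD []).length ≤ s.length := by
  cases h : PySem.Chars.splitOn s sep with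
  | nil => simp
  | cons a t =>
    have ha : a ∈ PySem.Chars.splitOn s sep := by rw [h]; exact List.mem_cons_self
    unfold PySem.Chars.splitOn at ha
    rcases pv_splitOn_go_mem_len sep (s.length + 1) s [] [] a ha with hx | hx
    · simp at hx
    · simpa using hx

-- termination helper: the bracket body ftext[l+1:-1] is strictly shorter than ftext when '(' ∈ ftext
theorem pv_body_len (cs : List Char) (h : PySem.Chars.isIn ['('] cs = true) :
    (PySem.Chars.slice cs (some (PySem.Chars.find cs ['('] + 1)) (some (-1))).length < cs.length := by
  have hne : 1 ≤ cs.length := by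
    have hinf := (PySem.Chars.isIn_iff_infix _ _).1 h
    simpa using hinf.sublist.length_le
  have hl : 0 ≤ PySem.Chars.find cs ['('] :=
    (PySem.Chars.find_nonneg_iff _ _).2 ((PySem.Chars.isIn_iff_infix _ _).1 h)
  rw [PySem.Chars.slice_eq_listSlice, PySem.List.length_slice]
  simp only [PySem.List.clampIdx]
  split_ifs <;> omega

-- A's unwrap: l = ftext.index('('), fname = ftext[:l], argstring = ftext[l+1:-1] (locals inlined)
def pv_unwrap (cs : List Char) : List Char × List (List Char) :=
  if PySem.Chars.isIn [')'] (PySem.Chars.slice cs (some (PySem.Chars.find cs ['('] + 1)) (some (-1))) = true then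
    (PySem.Chars.slice cs none (some (PySem.Chars.find cs ['('])),
      PySem.Chars.slice (PySem.Chars.slice cs (some (PySem.Chars.find cs ['('] + 1)) (some (-1))) none
          (some (PySem.Chars.rfind (PySem.Chars.slice cs (some (PySem.Chars.find cs ['('] + 1)) (some (-1))) [')'] + 1)) ::
        PySem.Chars.splitOn
          (PySem.Chars.slice (PySem.Chars.slice cs (some (PySem.Chars.find cs ['('] + 1)) (some (-1)))
            (some (PySem.Chars.rfind (PySem.Chars.slice cs (some (PySem.Chars.find cs ['('] + 1)) (some (-1))) [')'] + 2)) none) [','])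
  else
    (PySem.Chars.slice cs none (some (PySem.Chars.find cs ['('])),
      PySem.Chars.splitOn (PySem.Chars.slice cs (some (PySem.Chars.find cs ['('] + 1)) (some (-1))) [','])

theorem pv_unwrap_arg0_len (cs : List Char) (h : PySem.Chars.isIn ['('] cs = true) :
    ((pv_unwrap cs).2.headD []).length < cs.length := by
  have hb := pv_body_len cs h
  by_cases hp : PySem.Chars.isIn [')']
      (PySem.Chars.slice cs (some (PySem.Chars.find cs ['('] + 1)) (some (-1))) = true
  · have e : (pv_unwrap cs).2.headD [] =
        PySem.Chars.slice (PySem.Chars.slice cs (some (PySem.Chars.find cs ['('] + 1)) (some (-1))) none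
          (some (PySem.Chars.rfind (PySem.Chars.slice cs (some (PySem.Chars.find cs ['('] + 1)) (some (-1))) [')'] + 1)) := by
      unfold pv_unwrap; rw [if_pos hp]; rfl
    rw [e, PySem.Chars.slice_eq_listSlice]
    exact lt_of_le_of_lt (PySem.List.length_slice_le _ _ _) hb
  · have e : (pv_unwrap cs).2.headD [] =
        (PySem.Chars.splitOn (PySem.Chars.slice cs (some (PySem.Chars.find cs ['('] + 1)) (some (-1))) [',']).headD [] := by
      unfold pv_unwrap; rw [if_neg hp]
    rw [e]
    exact lt_of_le_of_lt (pv_splitOn_headD_len _ _) hb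

def get_function_name_core (cs : List Char) : Option (List Char) :=
  if h : PySem.Chars.isIn ['('] cs = true then
    if (pv_unwrap cs).1 = "output_filter".toList then
      get_function_name_core ((pv_unwrap cs).2.headD [])
    else if (pv_unwrap cs).1 = "upcast".toList then
      get_function_name_core ((pv_unwrap cs).2.headD [])
    else if (pv_unwrap cs).1 = "input_filter".toList then
      -- A computes newargs and recomputes the same call when len(args) == 3
      if (pv_unwrap cs).2.length = 3 then get_function_name_core ((pv_unwrap cs).2.headD [])
      else get_function_name_core ((pv_unwrap cs).2.headD [])
    else none
  else
    some (PySem.Chars.join ['.'] (PySem.Chars.splitOn ((PySem.Chars.splitOn cs [',']).headD []) ['~']))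
termination_by cs.length
decreasing_by all_goals exact pv_unwrap_arg0_len cs h

def get_function_name (functiontext : String) : Option String :=
  (get_function_name_core functiontext.toList).map String.ofList

-- ===== PORT B =====

def pv_wrappers : List (List Char) :=
  ["output_filter".toList, "upcast".toList, "input_filter".toList]

-- B's while loop: unwrap one layer per iteration, bail out on an unknown wrapper
def get_function_name_alt_loop (t : List Char) : Option (List Char) :=
  if h : PySem.Chars.isIn ['('] t = true then
    if PySem.Chars.slice t none (some (PySem.Chars.find t ['('])) ∈ pv_wrappers then
      if PySem.Chars.isIn [')'] (PySem.Chars.slice t (some (PySem.Chars.find t ['('] + 1)) (some (-1))) = true then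
        get_function_name_alt_loop
          (PySem.Chars.slice (PySem.Chars.slice t (some (PySem.Chars.find t ['('] + 1)) (some (-1))) none
            (some (PySem.Chars.rfind (PySem.Chars.slice t (some (PySem.Chars.find t ['('] + 1)) (some (-1))) [')'] + 1)))
      else
        get_function_name_alt_loop
          ((PySem.Chars.splitOn (PySem.Chars.slice t (some (PySem.Chars.find t ['('] + 1)) (some (-1))) [',']).headD [])
    else none
  else
    some (PySem.Chars.join ['.'] (PySem.Chars.splitOn ((PySem.Chars.splitOn t [',']).headD []) ['~']))
termination_by t.length
decreasing_by
  · exact lt_of_le_of_lt (PySem.List.length_slice_le _ _ _) (pv_body_len t h)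
  · exact lt_of_le_of_lt (pv_splitOn_headD_len _ _) (pv_body_len t h)

def get_function_name_alt (functiontext : String) : Option String :=
  (get_function_name_alt_loop functiontext.toList).map String.ofList

-- ===== PRECONDITION & SPEC =====
def Spec_get_function_name (functiontext : String) (out : Option String) : Prop := out = get_function_name_alt functiontext
instance (functiontext : String) (out : Option String) : Decidable (Spec_get_function_name functiontext out) := by unfold Spec_get_function_name; infer_instance

-- ===== CLAIM (what is proved, stated in full; the proofs are below) =====
def Claim_equal_get_function_name : Prop := ∀ (functiontext : String), Dom_get_function_name functiontext → Spec_get_function_name functiontext (get_function_name functiontext)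

-- ===== LEMMAS AND PROOFS =====

theorem pv_core_eq_loop (n : Nat) :
    ∀ cs : List Char, cs.length < n → get_function_name_core cs = get_function_name_alt_loop cs := by
  induction n with
  | zero => intro cs h; omega
  | succ n ih =>
    intro cs hlen
    rw [get_function_name_core, get_function_name_alt_loop]
    by_cases h : PySem.Chars.isIn ['('] cs = true
    · rw [dif_pos h, dif_pos h]
      have harg : ((pv_unwrap cs).2.headD []).length < n :=
        lt_of_lt_of_le (pv_unwrap_arg0_len cs h) (by omega)
      have hrec := ih _ harg
      by_cases hbr : PySem.Chars.isIn [')']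
          (PySem.Chars.slice cs (some (PySem.Chars.find cs ['('] + 1)) (some (-1))) = true
      · have e1 : PySem.Chars.slice cs none (some (PySem.Chars.find cs ['('])) = (pv_unwrap cs).1 := by
          unfold pv_unwrap; rw [if_pos hbr]
        have e2 : PySem.Chars.slice (PySem.Chars.slice cs (some (PySem.Chars.find cs ['('] + 1)) (some (-1))) none
            (some (PySem.Chars.rfind (PySem.Chars.slice cs (some (PySem.Chars.find cs ['('] + 1)) (some (-1))) [')'] + 1)) =
            (pv_unwrap cs).2.headD [] := by
          unfold pv_unwrap; rw [if_pos hbr]; rfl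
        rw [if_pos hbr, e1, e2, hrec]
        by_cases h1 : (pv_unwrap cs).1 = "output_filter".toList <;>
          by_cases h2 : (pv_unwrap cs).1 = "upcast".toList <;>
            by_cases h3 : (pv_unwrap cs).1 = "input_filter".toList <;>
              simp_all [pv_wrappers]
      · have e1 : PySem.Chars.slice cs none (some (PySem.Chars.find cs ['('])) = (pv_unwrap cs).1 := by
          unfold pv_unwrap; rw [if_neg hbr]
        have e2 : (PySem.Chars.splitOn (PySem.Chars.slice cs (some (PySem.Chars.find cs ['('] + 1)) (some (-1))) [',']).headD [] =
            (pv_unwrap cs).2.headD [] := by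
          unfold pv_unwrap; rw [if_neg hbr]
        rw [if_neg hbr, e1, e2, hrec]
        by_cases h1 : (pv_unwrap cs).1 = "output_filter".toList <;>
          by_cases h2 : (pv_unwrap cs).1 = "upcast".toList <;>
            by_cases h3 : (pv_unwrap cs).1 = "input_filter".toList <;>
              simp_all [pv_wrappers]
    · rw [dif_neg h, dif_neg h]

-- ===== VERDICT (by name: the statement is the Claim_ definition above) =====
theorem get_function_name_spec : Claim_equal_get_function_name := by
  intro s _
  unfold Spec_get_function_name get_function_name get_function_name_alt
  rw [pv_core_eq_loop (s.toList.length + 1) s.toList (by omega)]
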